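-- pv_equiv track=rewrite | github.com/ph4r05/booltest | booltest/common.py | poly_remap
-- ===== SOURCE A (Python) =====
-- def poly_remap(poly):
--     """
--     Remaps the polynomial to lower indices
--     e.g., x7x8x9 + x110x112 -> x0x1x2 + x3x4
--     :param poly:
--     :return: new normalized polynomial, var idx -> new var idx map
--     """
--     # mapping phase
--     idx = 0
--     idx_map_rev = {}  # orig idx -> new idx
--
--     res_poly = []
--     for term in poly:
--         res_term = []
--         for bitpos in term:
--             if bitpos not in idx_map_rev:
--                 idx_map_rev[bitpos] = idx
--                 res_term.append(idx)
--                 idx += 1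
--             else:
--                 res_term.append(idx_map_rev[bitpos])
--         if len(res_term) > 0:
--             res_poly.append(sorted(res_term))
--
--     return res_poly, idx_map_rev
-- ===== SOURCE B (Python) =====
-- def poly_remap(poly):
--     # pass 1: assign consecutive new indices in first-encounter order
--     idx = 0
--     idx_map_rev = {}  # orig idx -> new idx
--     for term in poly:
--         for bitpos in term:
--             if bitpos not in idx_map_rev:
--                 idx_map_rev[bitpos] = idx
--                 idx += 1
--     # pass 2: apply the finished mapping, dropping empty terms
--     res_poly = [sorted(idx_map_rev[b] for b in term) for term in poly if term]
--     return res_poly, idx_map_rev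
-- ===== Notes on version B (the rewrite author's own statement) =====
-- stated objective: alternative
-- what changed: A fuses index assignment and term rewriting in one nested loop threading (idx, map, result); B separates them into a build pass that only populates the first-encounter index map and a second pass that rewrites each non-empty term by pure lookup in the finished map.
import Mathlib
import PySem

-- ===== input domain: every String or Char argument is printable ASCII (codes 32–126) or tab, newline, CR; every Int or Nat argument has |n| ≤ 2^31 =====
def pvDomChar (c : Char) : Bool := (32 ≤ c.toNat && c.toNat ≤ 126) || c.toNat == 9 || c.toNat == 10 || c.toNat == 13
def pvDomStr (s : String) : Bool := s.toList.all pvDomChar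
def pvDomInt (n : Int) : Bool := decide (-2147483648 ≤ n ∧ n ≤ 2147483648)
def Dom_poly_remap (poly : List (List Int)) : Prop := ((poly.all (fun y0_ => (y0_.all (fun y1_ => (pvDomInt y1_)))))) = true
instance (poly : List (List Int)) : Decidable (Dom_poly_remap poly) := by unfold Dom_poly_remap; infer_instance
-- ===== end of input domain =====

-- B separates the fused remapping loop of A into a map-building pass and a pure lookup/rewrite pass (alternative decomposition, same cost).

-- ===== PORT A =====
-- inner loop body of A: state (idx, idx_map_rev, res_term)
def pvAInner (s : Int × PySem.Dict Int Int × List Int) (bitpos : Int) :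
    Int × PySem.Dict Int Int × List Int :=
  if s.2.1.contains bitpos = false then
    (s.1 + 1, s.2.1.insert bitpos s.1, s.2.2 ++ [s.1])
  else
    (s.1, s.2.1, s.2.2 ++ [s.2.1.getD bitpos 0])  -- key is present here, so getD = Python's idx_map_rev[bitpos]

-- outer loop body of A: state (idx, idx_map_rev, res_poly)
def pvAOuter (st : Int × PySem.Dict Int Int × List (List Int)) (term : List Int) :
    Int × PySem.Dict Int Int × List (List Int) :=
  let inner := term.foldl pvAInner (st.1, st.2.1, [])
  (inner.1, inner.2.1,
    if inner.2.2.length > 0 then st.2.2 ++ [PySem.List.sorted inner.2.2 (fun x => x) false]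
    else st.2.2)

def poly_remap (poly : List (List Int)) : List (List Int) × (List (Int × Int)) :=
  let st := poly.foldl pvAOuter (0, PySem.Dict.empty, [])
  (st.2.2, st.2.1.items)

-- ===== PORT B =====
-- pass-1 step of B: assign a fresh consecutive index on first encounter
def pvBStep (s : Int × PySem.Dict Int Int) (bitpos : Int) : Int × PySem.Dict Int Int :=
  if s.2.contains bitpos = false then (s.1 + 1, s.2.insert bitpos s.1) else s

def pvBBuild (poly : List (List Int)) : Int × PySem.Dict Int Int :=
  poly.foldl (fun s term => term.foldl pvBStep s) (0, PySem.Dict.empty)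

def poly_remap_alt (poly : List (List Int)) : List (List Int) × (List (Int × Int)) :=
  let m := (pvBBuild poly).2
  let res := (poly.filter (fun term => !term.isEmpty)).map
    (fun term => PySem.List.sorted (term.map (fun b => m.getD b 0)) (fun x => x) false)  -- keys all present: getD = idx_map_rev[b]
  (res, m.items)

-- ===== PRECONDITION & SPEC =====
def Spec_poly_remap (poly : List (List Int)) (out : List (List Int) × (List (Int × Int))) : Prop := out = poly_remap_alt poly
instance (poly : List (List Int)) (out : List (List Int) × (List (Int × Int))) : Decidable (Spec_poly_remap poly out) := by unfold Spec_poly_remap; infer_instance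

-- ===== CLAIM (what is proved, stated in full; the proofs are below) =====
def Claim_equal_poly_remap : Prop := ∀ (poly : List (List Int)), Dom_poly_remap poly → Spec_poly_remap poly (poly_remap poly)

-- ===== LEMMAS AND PROOFS =====

-- a key already in the map keeps its membership and value through B's inner fold
theorem pvB_pres (l : List Int) (s : Int × PySem.Dict Int Int) (k : Int)
    (h : s.2.contains k = true) :
    (l.foldl pvBStep s).2.contains k = true ∧ (l.foldl pvBStep s).2.getD k 0 = s.2.getD k 0 := by
  induction l generalizing s with
  | nil => exact ⟨h, rfl⟩
  | cons b t ih =>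
    simp only [List.foldl_cons]
    by_cases hb : s.2.contains b = false
    · have hkb : k ≠ b := by intro e; rw [e] at h; rw [h] at hb; exact Bool.true_eq_false.mp hb
      have h' : (pvBStep s b).2.contains k = true := by
        simp [pvBStep, hb, PySem.Dict.contains_insert, h]
      have := ih (pvBStep s b) h'
      refine ⟨this.1, ?_⟩
      rw [this.2]
      simp [pvBStep, hb, PySem.Dict.getD_insert_of_ne _ _ _ hkb]
    · have : pvBStep s b = s := by simp [pvBStep, hb]
      rw [this]; exact ih s h

-- same preservation through B's outer fold over the remaining terms
theorem pvB_pres_outer (rest : List (List Int)) (s : Int × PySem.Dict Int Int) (k : Int)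
    (h : s.2.contains k = true) :
    ((rest.foldl (fun s term => term.foldl pvBStep s) s).2.contains k = true ∧
     (rest.foldl (fun s term => term.foldl pvBStep s) s).2.getD k 0 = s.2.getD k 0) := by
  induction rest generalizing s with
  | nil => exact ⟨h, rfl⟩
  | cons term rest ih =>
    simp only [List.foldl_cons]
    have h1 := pvB_pres term s k h
    have h2 := ih (term.foldl pvBStep s) h1.1
    exact ⟨h2.1, h2.2.trans h1.2⟩

-- after B's inner fold over a term, every bit position of the term is in the map
theorem pvB_allin (l : List Int) (s : Int × PySem.Dict Int Int) :
    ∀ b ∈ l, (l.foldl pvBStep s).2.contains b = true := by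
  induction l generalizing s with
  | nil => intro b hb; cases hb
  | cons c t ih =>
    intro b hb
    simp only [List.foldl_cons]
    rcases List.mem_cons.mp hb with rfl | hbt
    · have hc : (pvBStep s b).2.contains b = true := by
        by_cases h : s.2.contains b = false
        · simp [pvBStep, h, PySem.Dict.contains_insert_self]
        · simp at h
          simp [pvBStep, h]
      exact (pvB_pres t (pvBStep s b) b hc).1
    · exact ih (pvBStep s c) b hbt

-- A's inner loop = B's pass-1 inner fold plus lookups in the resulting map
theorem pvA_inner_eq (term : List Int) (idx : Int) (m : PySem.Dict Int Int) (rt : List Int) :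
    term.foldl pvAInner (idx, m, rt)
      = ((term.foldl pvBStep (idx, m)).1, (term.foldl pvBStep (idx, m)).2,
         rt ++ term.map (fun b => (term.foldl pvBStep (idx, m)).2.getD b 0)) := by
  induction term generalizing idx m rt with
  | nil => simp
  | cons b t ih =>
    simp only [List.foldl_cons, List.map_cons]
    by_cases hb : m.contains b = false
    · have hstepA : pvAInner (idx, m, rt) b = (idx + 1, m.insert b idx, rt ++ [idx]) := by
        simp [pvAInner, hb]
      have hstepB : pvBStep (idx, m) b = (idx + 1, m.insert b idx) := by
        simp [pvBStep, hb]
      rw [hstepA, hstepB, ih]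
      have hval : (t.foldl pvBStep (idx + 1, m.insert b idx)).2.getD b 0 = idx := by
        have := pvB_pres t (idx + 1, m.insert b idx) b
          (by simp [PySem.Dict.contains_insert_self])
        rw [this.2]; simp [PySem.Dict.getD_insert_self]
      rw [hval]; simp
    · have hstepA : pvAInner (idx, m, rt) b = (idx, m, rt ++ [m.getD b 0]) := by
        simp [pvAInner, hb]
      have hstepB : pvBStep (idx, m) b = (idx, m) := by
        simp [pvBStep, hb]
      rw [hstepA, hstepB, ih]
      have hval : (t.foldl pvBStep (idx, m)).2.getD b 0 = m.getD b 0 := by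
        simp at hb
        exact (pvB_pres t (idx, m) b hb).2
      rw [hval]; simp

-- A's outer loop = B's pass 1 followed by B's pass 2 over the same terms
theorem pvA_outer_eq (rest : List (List Int)) (idx : Int) (m : PySem.Dict Int Int)
    (res : List (List Int)) :
    rest.foldl pvAOuter (idx, m, res)
      = ((rest.foldl (fun s term => term.foldl pvBStep s) (idx, m)).1,
         (rest.foldl (fun s term => term.foldl pvBStep s) (idx, m)).2,
         res ++ (rest.filter (fun term => !term.isEmpty)).map
           (fun term => PySem.List.sorted
             (term.map (fun b =>
               (rest.foldl (fun s term => term.foldl pvBStep s) (idx, m)).2.getD b 0))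
             (fun x => x) false)) := by
  induction rest generalizing idx m res with
  | nil => simp
  | cons term rest ih =>
    simp only [List.foldl_cons, List.filter_cons]
    have houter : pvAOuter (idx, m, res) term
        = ((term.foldl pvBStep (idx, m)).1, (term.foldl pvBStep (idx, m)).2,
           if term.isEmpty = false then
             res ++ [PySem.List.sorted (term.map (fun b =>
               (term.foldl pvBStep (idx, m)).2.getD b 0)) (fun x => x) false]
           else res) := by
      simp only [pvAOuter, pvA_inner_eq term idx m []]
      cases term with
      | nil => simp
      | cons c t => simp
    rw [houter]
    set s1 := term.foldl pvBStep (idx, m) with hs1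
    have hs1e : (s1.1, s1.2) = s1 := rfl
    have hmapeq : term.map (fun b =>
        (rest.foldl (fun s term => term.foldl pvBStep s) s1).2.getD b 0)
      = term.map (fun b => s1.2.getD b 0) := by
      apply List.map_congr_left
      intro b hb
      exact (pvB_pres_outer rest s1 b (pvB_allin term (idx, m) b hb)).2
    cases hterm : term.isEmpty with
    | true =>
      rw [if_neg (show ¬(true = false) by simp)]
      have := ih s1.1 s1.2 res
      rw [hs1e] at this
      rw [this]
      simp
    | false =>
      rw [if_pos rfl]
      have := ih s1.1 s1.2
        (res ++ [PySem.List.sorted (term.map (fun b => s1.2.getD b 0)) (fun x => x) false])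
      rw [hs1e] at this
      rw [this]
      simp [hmapeq]

-- ===== VERDICT (by name: the statement is the Claim_ definition above) =====
theorem poly_remap_spec : Claim_equal_poly_remap := by
  intro poly _
  unfold Spec_poly_remap poly_remap poly_remap_alt pvBBuild
  rw [pvA_outer_eq poly 0 PySem.Dict.empty []]
  simp
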